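-- pv_equiv track=rewrite | github.com/liamhowatt34/ultimateTexasHoldem | main.py | is_one_pair
-- ===== SOURCE A (Python) =====
-- from typing import Tuple
--
-- def face_to_int(cards) -> list[int]:
--     ranks = [card[:-1] for card in cards]
--
--     ranks = ['11' if rank == 'J' else rank for rank in ranks]
--     ranks = ['12' if rank == 'Q' else rank for rank in ranks]
--     ranks = ['13' if rank == 'K' else rank for rank in ranks]
--     ranks = ['14' if rank == 'A' else rank for rank in ranks]
--
--     int_ranks = [int(rank) for rank in ranks]
--
--     return int_ranks
--
-- def is_one_pair(hand, board) -> Tuple[int, int]: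
--     cards = hand + board
--     ranks = face_to_int(cards)
--     counts = {}
--     final_hand = []
--     pair_rank = 0
--
--     for rank in ranks:
--         if rank not in counts:
--             counts[rank] = 1
--         else:
--             counts[rank] += 1
--
--     pairs = [key for key, value in counts.items() if value == 2]
--
--     if pairs:
--         pair_rank = max(pairs)
--
--         remaining_ranks = [rank for rank in ranks if rank != pair_rank]
--         remaining_ranks.sort()
--         final_hand.extend(remaining_ranks[-3:])
--
--         final_hand.append(pair_rank * 2)
--
--         return pair_rank, sum(final_hand)
--
--     return 0, 0
-- ===== SOURCE B (Python) =====
-- from typing import Tuple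
--
-- _FACE = {'J': '11', 'Q': '12', 'K': '13', 'A': '14'}
--
-- def is_one_pair(hand, board) -> Tuple[int, int]:
--     # Sort the integer ranks once, then find pairs by grouping equal adjacent values.
--     ranks = sorted(int(_FACE.get(c[:-1], c[:-1])) for c in hand + board)
--
--     pair = None          # best (= largest) rank whose run length is exactly 2
--     run_val, run_len = None, 0
--     for r in ranks:
--         if run_val is not None and r == run_val:
--             run_len += 1
--         else:
--             if run_len == 2:
--                 pair = run_val
--             run_val, run_len = r, 1
--     if run_len == 2:
--         pair = run_val
--
--     if pair is None:
--         return 0, 0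
--     kickers = [r for r in ranks if r != pair]
--     return pair, sum(kickers[-3:]) + 2 * pair
-- ===== Notes on version B (the rewrite author's own statement) =====
-- stated objective: alternative
-- what changed: Replaces A's counting dict + per-pair filtering with one sort of the integer ranks followed by a single adjacent-grouping pass (run length exactly 2 = pair, last such run = max pair), then filters the pair out of the already-sorted list instead of re-sorting.
import Mathlib
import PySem

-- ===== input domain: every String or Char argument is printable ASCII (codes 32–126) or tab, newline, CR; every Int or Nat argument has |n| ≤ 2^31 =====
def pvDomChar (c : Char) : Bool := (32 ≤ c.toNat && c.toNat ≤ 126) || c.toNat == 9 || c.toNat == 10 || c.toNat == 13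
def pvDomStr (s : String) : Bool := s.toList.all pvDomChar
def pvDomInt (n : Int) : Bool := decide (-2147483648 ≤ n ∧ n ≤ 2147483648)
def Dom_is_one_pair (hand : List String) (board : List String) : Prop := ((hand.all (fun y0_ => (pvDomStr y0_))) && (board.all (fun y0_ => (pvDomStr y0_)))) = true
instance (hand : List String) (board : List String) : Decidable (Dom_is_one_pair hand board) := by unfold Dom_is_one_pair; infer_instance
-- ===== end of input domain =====

-- B replaces A's counting dict with a single pass over the sorted ranks that groups equal
-- adjacent values (run length exactly 2 = a pair; the last such run is the largest), then
-- filters the pair out of the already-sorted list: same value on every input where A returns.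

-- ===== PORT A =====
-- face_to_int: four rewriting passes, then int() on every rank (none = ValueError, excluded by Pre_)
def face_to_int? (cards : List String) : Option (List Int) :=
  let ranks := cards.map (fun card => PySem.List.slice card.toList none (some (-1)))  -- card[:-1]
  let ranks := ranks.map (fun rank => if rank = ['J'] then ['1','1'] else rank)
  let ranks := ranks.map (fun rank => if rank = ['Q'] then ['1','2'] else rank)
  let ranks := ranks.map (fun rank => if rank = ['K'] then ['1','3'] else rank)
  let ranks := ranks.map (fun rank => if rank = ['A'] then ['1','4'] else rank)
  ranks.mapM PySem.Int.ofChars?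

def is_one_pair (hand : List String) (board : List String) : Int × Int :=
  let cards := hand ++ board
  match face_to_int? cards with
  | none => (0, 0)  -- unreachable under Pre_: int() raises ValueError in Python
  | some ranks =>
    let counts := ranks.foldl
      (fun counts rank =>
        if counts.contains rank = false then counts.insert rank 1
        else counts.insert rank (counts.getD rank 0 + 1))
      (PySem.Dict.empty : PySem.Dict Int Int)
    let pairs := (counts.items.filter (fun p => p.2 == 2)).map (·.1)
    match PySem.List.max? pairs (fun x => x) with  -- 'if pairs: max(pairs)' (none ↔ pairs = [])
    | none => (0, 0)
    | some pair_rank =>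
      let remaining_ranks := ranks.filter (fun rank => rank != pair_rank)
      let remaining_ranks := PySem.List.sorted remaining_ranks (fun x => x) false
      let final_hand : List Int := [] ++ PySem.List.slice remaining_ranks (some (-3)) none
      let final_hand := final_hand ++ [pair_rank * 2]
      (pair_rank, final_hand.sum)

-- ===== PORT B =====
def pvFaceDict : PySem.Dict (List Char) (List Char) :=
  PySem.Dict.ofList [(['J'],['1','1']), (['Q'],['1','2']), (['K'],['1','3']), (['A'],['1','4'])]

-- int(_FACE.get(c[:-1], c[:-1]))
def rank_of? (c : String) : Option Int :=
  let r := PySem.List.slice c.toList none (some (-1))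
  PySem.Int.ofChars? (pvFaceDict.getD r r)

-- state = (pair, run_val, run_len); 'run_val is not None and r == run_val' = 'some r = run_val'
def pvStep (s : Option Int × Option Int × Int) (r : Int) : Option Int × Option Int × Int :=
  if s.2.1 = some r then (s.1, s.2.1, s.2.2 + 1)
  else ((if s.2.2 = 2 then s.2.1 else s.1), some r, 1)

def is_one_pair_alt (hand : List String) (board : List String) : Int × Int :=
  match (hand ++ board).mapM rank_of? with
  | none => (0, 0)  -- int() raises in Python; outside Pre_
  | some rs =>
    let ranks := PySem.List.sorted rs (fun x => x) false
    let st := ranks.foldl pvStep (none, none, 0)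
    let pair := if st.2.2 = 2 then st.2.1 else st.1
    match pair with
    | none => (0, 0)
    | some p =>
      let kickers := ranks.filter (fun r => r != p)
      (p, (PySem.List.slice kickers (some (-3)) none).sum + 2 * p)

-- ===== PRECONDITION & SPEC =====
-- the rank part of a card, after the J/Q/K/A substitution (mirrors both programs' parse)
def pvRankChars (c : String) : List Char :=
  let r := c.toList.dropLast
  if r = ['J'] then ['1','1'] else if r = ['Q'] then ['1','2']
  else if r = ['K'] then ['1','3'] else if r = ['A'] then ['1','4'] else r

-- Pre_ excludes exactly the inputs where Python's int() raises ValueError on some card's rank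
def Pre_is_one_pair (hand : List String) (board : List String) : Prop :=
  ∀ c ∈ hand ++ board, (PySem.Int.ofChars? (pvRankChars c)).isSome = true
instance (hand : List String) (board : List String) : Decidable (Pre_is_one_pair hand board) := by
  unfold Pre_is_one_pair; infer_instance

def pvWitness_is_one_pair : List String × List String := (["7h", "7d"], ["Ah", "Kd", "2c"])

def Spec_is_one_pair (hand : List String) (board : List String) (out : Int × Int) : Prop := out = is_one_pair_alt hand board
instance (hand : List String) (board : List String) (out : Int × Int) : Decidable (Spec_is_one_pair hand board out) := by unfold Spec_is_one_pair; infer_instance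

-- ===== CLAIM (what is proved, stated in full; the proofs are below) =====
def Claim_equal_is_one_pair : Prop := ∀ (hand : List String) (board : List String), Dom_is_one_pair hand board → Pre_is_one_pair hand board → Spec_is_one_pair hand board (is_one_pair hand board)

-- ===== LEMMAS AND PROOFS =====

-- the maximum rank occurring in a run of length exactly 2 in a sorted list, recursively
def pairSpec : List Int → Option Int
  | [] => none
  | b :: t =>
    (pairSpec (t.dropWhile (fun x => x == b))).orElse
      (fun _ => if (t.takeWhile (fun x => x == b)).length = 1 then some b else none)
termination_by l => l.length
  decreasing_by simp only [List.length_cons]; exact Nat.lt_succ_of_le (List.length_dropWhile_le _ t)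

theorem subst_chain (r : List Char) :
    (fun r => if r = ['A'] then ['1','4'] else r)
    ((fun r => if r = ['K'] then ['1','3'] else r)
    ((fun r => if r = ['Q'] then ['1','2'] else r)
    ((fun r => if r = ['J'] then ['1','1'] else r) r))) = pvFaceDict.getD r r := by
  have hd : pvFaceDict = PySem.Dict.mk [(['J'],['1','1']), (['Q'],['1','2']), (['K'],['1','3']), (['A'],['1','4'])] := by decide
  rw [hd, PySem.Dict.getD_eq_get?_getD]
  simp only [PySem.Dict.get?_mk_cons]
  split_ifs <;> simp_all [PySem.Dict.get?]

theorem fusion (cards : List String) : face_to_int? cards = cards.mapM rank_of? := by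
  simp only [face_to_int?, List.map_map]
  induction cards with
  | nil => rfl
  | cons c t ih =>
      simp only [List.map_cons, List.mapM_cons, ih, Function.comp, rank_of?, subst_chain]

theorem absorb (k : Nat) (t : List Int) (p : Option Int) (b : Int) (n : Int) :
    (List.replicate k b ++ t).foldl pvStep (p, some b, n) = t.foldl pvStep (p, some b, n + k) := by
  induction k generalizing n with
  | zero => simp
  | succ k ih =>
      simp only [List.replicate_succ, List.cons_append, List.foldl_cons, pvStep, if_true]
      rw [ih]
      have hn : n + 1 + (k:Int) = n + ((k+1 : Nat) : Int) := by push_cast; ring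
      rw [hn]

theorem chunk (t : List Int) (b : Int) (q : Option Int)
    (hs : (b :: t).Pairwise (· ≤ ·)) :
    (if (t.foldl pvStep (q, some b, 1)).2.2 = 2 then (t.foldl pvStep (q, some b, 1)).2.1
     else (t.foldl pvStep (q, some b, 1)).1)
      = ((pairSpec (b :: t)).orElse (fun _ => q)) := by
  have htk : t.takeWhile (fun x => x == b) = List.replicate (t.takeWhile (fun x => x == b)).length b := by
    rw [List.eq_replicate_length]
    intro x hx
    simpa using List.mem_takeWhile_imp hx
  have hdec : t = List.replicate (t.takeWhile (fun x => x == b)).length b ++ t.dropWhile (fun x => x == b) := by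
    conv_lhs => rw [← List.takeWhile_append_dropWhile (p := fun x => x == b) (l := t)]
    rw [← htk]
  rw [pairSpec]
  cases hr : t.dropWhile (fun x => x == b) with
  | nil =>
      conv_lhs => rw [hdec, hr]
      rw [absorb]
      simp only [List.foldl_nil, pairSpec]
      by_cases hk : (t.takeWhile (fun x => x == b)).length = 1
      · simp [hk, Option.orElse]
      · have h2 : ¬((1:Int) + ((t.takeWhile (fun x => x == b)).length : Int) = 2) := by omega
        simp [hk, h2, Option.orElse]
  | cons c rest' =>
      have hcb : (c == b) = false := by
        have := List.head?_dropWhile_not (p := fun x => x == b) (l := t)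
        rw [hr] at this
        simpa using this
      have hcb' : b ≠ c := by
        intro h; rw [h] at hcb; simp at hcb
      have hct : c ∈ t := by
        have : c ∈ t.dropWhile (fun x => x == b) := by rw [hr]; exact List.mem_cons_self
        exact (List.dropWhile_sublist _).mem this
      have hbc : b < c := lt_of_le_of_ne ((List.pairwise_cons.mp hs).1 c hct) hcb'
      have hrest_sorted : (c :: rest').Pairwise (· ≤ ·) := by
        rw [← hr]
        exact ((List.pairwise_cons.mp hs).2).sublist (List.dropWhile_sublist _)
      have hstep : t.foldl pvStep (q, some b, 1)
          = rest'.foldl pvStep ((if (1:Int) + (t.takeWhile (fun x => x == b)).length = 2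
              then some b else q), some c, 1) := by
        conv_lhs => rw [hdec, hr]
        rw [absorb]
        simp only [List.foldl_cons, pvStep]
        rw [if_neg (by simpa using hcb')]
      rw [hstep]
      rw [chunk rest' c _ hrest_sorted]
      cases hps : pairSpec (c :: rest') with
      | some m => simp [Option.orElse]
      | none =>
          by_cases hk : (t.takeWhile (fun x => x == b)).length = 1
          · simp [hk, Option.orElse]
          · have h2 : ¬((1:Int) + ((t.takeWhile (fun x => x == b)).length : Int) = 2) := by omega
            simp [hk, h2, Option.orElse]
termination_by t.length
decreasing_by
  have h1 : (t.dropWhile (fun x => x == b)).length ≤ t.length := List.length_dropWhile_le _ t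
  rw [hr] at h1
  simp at h1
  omega

theorem fold_eq_pairSpec (l : List Int) (hs : l.Pairwise (· ≤ ·)) :
    (if (l.foldl pvStep (none, none, 0)).2.2 = 2 then (l.foldl pvStep (none, none, 0)).2.1
     else (l.foldl pvStep (none, none, 0)).1) = pairSpec l := by
  cases l with
  | nil => simp [pairSpec]
  | cons b t =>
      simp only [List.foldl_cons]
      have h0 : pvStep (none, none, 0) b = (none, some b, 1) := by simp [pvStep]
      rw [h0, chunk t b none hs]
      cases pairSpec (b :: t) <;> simp [Option.orElse]

theorem pairSpec_char_aux (n : Nat) (l : List Int) (hn : l.length ≤ n) (hs : l.Pairwise (· ≤ ·)) :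
    (∀ m, pairSpec l = some m → l.count m = 2 ∧ ∀ x ∈ l, l.count x = 2 → x ≤ m)
    ∧ (pairSpec l = none → ∀ x ∈ l, l.count x ≠ 2) := by
  induction n generalizing l with
  | zero =>
    have : l = [] := List.eq_nil_of_length_eq_zero (Nat.le_zero.mp hn)
    subst this; simp [pairSpec]
  | succ n ihn =>
   cases l with
   | nil => simp [pairSpec]
   | cons b t =>
    have htk : t.takeWhile (fun x => x == b) = List.replicate (t.takeWhile (fun x => x == b)).length b := by
      rw [List.eq_replicate_length]; intro x hx; simpa using List.mem_takeWhile_imp hx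
    have hdec : t = List.replicate (t.takeWhile (fun x => x == b)).length b ++ t.dropWhile (fun x => x == b) := by
      conv_lhs => rw [← List.takeWhile_append_dropWhile (p := fun x => x == b) (l := t)]
      rw [← htk]
    set k := (t.takeWhile (fun x => x == b)).length with hkdef
    set rest := t.dropWhile (fun x => x == b) with hrdef
    have hrest_sorted : rest.Pairwise (· ≤ ·) :=
      ((List.pairwise_cons.mp hs).2).sublist (List.dropWhile_sublist _)
    have hbx : ∀ x ∈ rest, b < x := by
      cases hr : rest with
      | nil => simp
      | cons c rest' =>
        have hcb : (c == b) = false := by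
          have := List.head?_dropWhile_not (p := fun x => x == b) (l := t)
          rw [← hrdef, hr] at this; simpa using this
        have hct : c ∈ t := by
          have : c ∈ rest := by rw [hr]; exact List.mem_cons_self
          exact (List.dropWhile_sublist _).mem (hrdef ▸ this)
        have hbc : b < c := lt_of_le_of_ne ((List.pairwise_cons.mp hs).1 c hct)
          (by intro h; rw [h] at hcb; simp at hcb)
        intro x hx
        rcases List.mem_cons.mp hx with rfl | hx'
        · exact hbc
        · have hcx : c ≤ x := by
            have hrs := hrest_sorted
            rw [hr] at hrs
            exact (List.pairwise_cons.mp hrs).1 x hx'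
          exact lt_of_lt_of_le hbc hcx
    have hbne : ∀ x ∈ rest, x ≠ b := fun x hx h => absurd (hbx x hx) (by rw [h]; exact lt_irrefl b)
    have hcountb : (b :: t).count b = 1 + k := by
      rw [List.count_cons_self]
      conv_lhs => rw [hdec]
      rw [List.count_append, List.count_replicate]
      have h0 : rest.count b = 0 := List.count_eq_zero.mpr (fun h => hbne b h rfl)
      simp [h0]; omega
    have hcountx : ∀ x ∈ rest, (b :: t).count x = rest.count x := by
      intro x hx
      have hxb : x ≠ b := hbne x hx
      conv_lhs => rw [hdec]
      simp [List.count_append, List.count_replicate, Ne.symm hxb]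
    have hmem : ∀ x ∈ b :: t, x = b ∨ x ∈ rest := by
      intro x hx
      rcases List.mem_cons.mp hx with rfl | hx'
      · exact Or.inl rfl
      · rw [hdec] at hx'
        rcases List.mem_append.mp hx' with h | h
        · exact Or.inl (List.eq_of_mem_replicate h)
        · exact Or.inr h
    have hrlen : rest.length ≤ n := by
      have h1 : rest.length ≤ t.length := List.length_dropWhile_le _ t
      simp only [List.length_cons] at hn; omega
    have IH := ihn rest hrlen hrest_sorted
    rw [pairSpec]
    rw [← hrdef, ← hkdef]
    cases hps : pairSpec rest with
    | some m =>
      have hm := IH.1 m hps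
      have hmr : m ∈ rest := by
        have : 0 < rest.count m := by omega
        exact List.count_pos_iff.mp this
      constructor
      · intro m' hm'
        simp [Option.orElse] at hm'
        subst hm'
        refine ⟨by rw [hcountx m hmr]; exact hm.1, ?_⟩
        intro x hx hcx
        rcases hmem x hx with rfl | hxr
        · exact le_of_lt (hbx m hmr)
        · exact hm.2 x hxr (by rw [← hcountx x hxr]; exact hcx)
      · intro h; simp [Option.orElse] at h
    | none =>
      have IHn := IH.2 hps
      constructor
      · intro m' hm'
        simp [Option.orElse] at hm'
        by_cases hk1 : k = 1
        · simp [hk1] at hm'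
          subst hm'
          refine ⟨by rw [hcountb, hk1], ?_⟩
          intro x hx hcx
          rcases hmem x hx with rfl | hxr
          · exact le_refl _
          · exact absurd (by rw [← hcountx x hxr]; exact hcx) (IHn x hxr)
        · simp [hk1] at hm'
      · intro h
        simp [Option.orElse] at h
        intro x hx hcx
        rcases hmem x hx with rfl | hxr
        · rw [hcountb] at hcx
          have : k = 1 := by omega
          simp [this] at h
        · exact IHn x hxr (by rw [← hcountx x hxr]; exact hcx)
theorem pairSpec_char (l : List Int) (hs : l.Pairwise (· ≤ ·)) :
    (∀ m, pairSpec l = some m → l.count m = 2 ∧ ∀ x ∈ l, l.count x = 2 → x ≤ m)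
    ∧ (pairSpec l = none → ∀ x ∈ l, l.count x ≠ 2) :=
  pairSpec_char_aux l.length l le_rfl hs


-- ===== VERDICT (by name: the statement is the Claim_ definition above) =====
theorem is_one_pair_spec : Claim_equal_is_one_pair := by
  intro hand board _ _
  unfold Spec_is_one_pair is_one_pair is_one_pair_alt
  cases h : (hand ++ board).mapM rank_of? with
  | none => simp only [fusion, h]
  | some rs =>
    simp only [fusion, h]
    have hsort : (PySem.List.sorted rs (fun x => x) false).Pairwise (· ≤ ·) := by
      simpa using PySem.List.sorted_pairwise (xs := rs) (key := fun x => x)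
    have hperm : (PySem.List.sorted rs (fun x => x) false).Perm rs :=
      PySem.List.sorted_perm (xs := rs) (key := fun x => x) (rev := false)
    have hcounts : rs.foldl
        (fun counts rank =>
          if counts.contains rank = false then counts.insert rank 1
          else counts.insert rank (counts.getD rank 0 + 1))
        (PySem.Dict.empty : PySem.Dict Int Int) = PySem.Dict.counter rs := by
      rw [← PySem.Dict.foldl_insert_getD_add_one_eq_counter]
      apply PySem.List.foldl_congr_mem
      intro acc x hx
      by_cases hc : acc.contains x
      · simp [hc]
      · have hc' : acc.contains x = false := by simpa using hc
        rw [PySem.Dict.getD_of_not_contains (h := hc')]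
        simp [hc']
    rw [hcounts, PySem.Dict.items_counter]
    rw [fold_eq_pairSpec _ hsort]
    simp only [List.filter_map, List.map_map, Function.comp_def]
    simp only [List.map_id']
    cases hps : pairSpec (PySem.List.sorted rs (fun x => x) false) with
    | none =>
      have hnone := (pairSpec_char _ hsort).2 hps
      have hempty : List.filter (fun x => (List.count x rs : Int) == 2) (PySem.Set.ofList rs) = [] := by
        apply List.filter_eq_nil_iff.mpr
        intro k hk
        have hkrs : k ∈ rs := (PySem.Set.mem_ofList _ _).mp hk
        have hksrt : k ∈ PySem.List.sorted rs (fun x => x) false := (PySem.List.mem_sorted _ _ _ _).mpr hkrs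
        have hne := hnone k hksrt
        rw [hperm.count_eq] at hne
        simp only [beq_iff_eq]
        intro hcast
        exact hne (by exact_mod_cast hcast)
      rw [hempty]
      simp [PySem.List.max?]
    | some m =>
      have hchar := (pairSpec_char _ hsort).1 m hps
      have hmsrt : m ∈ PySem.List.sorted rs (fun x => x) false :=
        List.count_pos_iff.mp (by omega)
      have hmrs : m ∈ rs := (PySem.List.mem_sorted _ _ _ _).mp hmsrt
      have hcm : List.count m rs = 2 := by rw [← hperm.count_eq]; exact hchar.1
      have hmS : m ∈ List.filter (fun x => (List.count x rs : Int) == 2) (PySem.Set.ofList rs) := by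
        apply List.mem_filter.mpr
        exact ⟨(PySem.Set.mem_ofList _ _).mpr hmrs, by simp [hcm]⟩
      cases hmx : PySem.List.max?
          (List.filter (fun x => (List.count x rs : Int) == 2) (PySem.Set.ofList rs)) (fun x => x) with
      | none =>
        rw [PySem.List.max?_eq_none_iff] at hmx
        rw [hmx] at hmS
        cases hmS
      | some m' =>
        have hm'S := PySem.List.max?_mem hmx
        have hm'rs : m' ∈ rs := (PySem.Set.mem_ofList _ _).mp (List.mem_filter.mp hm'S).1
        have hcm' : List.count m' rs = 2 := by
          have := (List.mem_filter.mp hm'S).2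
          simpa using (by exact_mod_cast (beq_iff_eq.mp this) : List.count m' rs = 2)
        have hle1 : m ≤ m' := PySem.List.max?_isMax hmx m hmS
        have hle2 : m' ≤ m := hchar.2 m' ((PySem.List.mem_sorted _ _ _ _).mpr hm'rs)
          (by rw [hperm.count_eq]; exact hcm')
        have hmm : m' = m := le_antisymm hle2 hle1
        subst hmm
        simp only []
        have hkick : PySem.List.sorted (List.filter (fun rank => rank != m') rs) (fun x => x) false
            = List.filter (fun r => r != m') (PySem.List.sorted rs (fun x => x) false) :=
          PySem.List.sorted_id_eq_of_perm_of_pairwise _ _ (hperm.filter _) (hsort.filter _)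
        rw [hkick]
        simp [List.sum_append]
        ring
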